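-- pv_equiv track=rewrite | github.com/eh329/RosalindProblems | Algorithmic Heights/Locating_Restriction_Sites.py | rest_site
-- ===== SOURCE A (Python) =====
-- def reverse_pal(sub_seq):
--
--     bases = {"A": "T",
--             "T": "A",
--             "C": "G",
--             "G": "C"}
--
--     return "".join([bases[x] for x in reversed(sub_seq)])
--
-- def rest_site(seq):
--     """
--     Given: A DNA string of length at most 1 kbp in FASTA format.
--     Return: The position and length of every reverse palindrome in the string having length between 4 and 12.
--     You may return these pairs in any order.
--    """
--
--     res = []
--
--     for i in range(0, len(seq)):
--         for j in range(4, 13):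
--
--             sub = seq[i: i + j]
--
--             if len(sub) < j:
--                 continue
--
--             rev_pal = reverse_pal(sub)
--
--             if sub == rev_pal:
--                 res.append((i + 1, j))
--
--     return res
-- ===== SOURCE B (Python) =====
-- def rest_site(seq):
--     """Center-expansion: for each gap between adjacent characters, grow the
--     reverse palindrome outwards while the paired bases are complementary,
--     then sort the collected (position, length) pairs."""
--     comp = {"A": "T", "T": "A", "C": "G", "G": "C"}
--     n = len(seq)
--     found = []
--     for c in range(1, n):
--         r = 1
--         while r <= c and c - 1 + r < n and 2 * r <= 12 and comp.get(seq[c - r]) == seq[c - 1 + r]: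
--             if 2 * r >= 4:
--                 found.append((c - r + 1, 2 * r))
--             r += 1
--     return sorted(found)
-- ===== Notes on version B (the rewrite author's own statement) =====
-- stated objective: alternative
-- what changed: B finds reverse palindromes by expanding outwards around each gap between adjacent characters while the paired bases are complementary (collecting the even lengths 4..12 and sorting the pairs by (position, length)), instead of A's scan that rebuilds and compares a reverse-complement string for every (start, length) window.
import Mathlib
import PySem

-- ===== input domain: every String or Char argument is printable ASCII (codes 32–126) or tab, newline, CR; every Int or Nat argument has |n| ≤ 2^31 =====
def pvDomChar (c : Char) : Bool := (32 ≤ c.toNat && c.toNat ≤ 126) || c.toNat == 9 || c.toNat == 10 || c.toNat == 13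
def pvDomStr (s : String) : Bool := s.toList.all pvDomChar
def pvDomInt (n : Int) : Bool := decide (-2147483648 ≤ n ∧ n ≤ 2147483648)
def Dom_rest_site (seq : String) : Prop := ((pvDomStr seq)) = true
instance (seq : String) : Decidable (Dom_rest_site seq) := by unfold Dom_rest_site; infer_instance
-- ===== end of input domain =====

-- B replaces A's rebuild-the-reverse-complement scan over every (start, length) window by a
-- centre-expansion that grows each even palindrome outwards and sorts the results (objective: alternative).

-- ===== PORT A =====
-- Python dict {"A": "T", …}: its length-1 string keys/values are ported as Char (exact on these literals)
def pvBases : PySem.Dict Char Char :=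
  ((((PySem.Dict.empty).insert 'A' 'T').insert 'T' 'A').insert 'C' 'G').insert 'G' 'C'

-- bases[x] raises KeyError on a char other than A, C, G, T; those inputs are excluded by Pre_rest_site,
-- so the total stand-in `getD x x` is exact on every admitted input
def reverse_pal (sub_seq : List Char) : List Char :=
  (sub_seq.reverse).map (fun x => pvBases.getD x x)

def rest_site (seq : String) : List (Int × Int) :=
  let l := seq.toList
  (PySem.List.pyRange 0 (PySem.List.len l) 1).foldl (fun res i =>
    (PySem.List.pyRange 4 13 1).foldl (fun res j =>
      let sub := PySem.List.slice l (some i) (some (i + j))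
      if PySem.List.len sub < j then res
      else
        let rev_pal := reverse_pal sub
        if sub = rev_pal then res ++ [(i + 1, j)] else res) res) []

-- ===== PORT B =====
def pvComp : PySem.Dict Char Char :=
  ((((PySem.Dict.empty).insert 'A' 'T').insert 'T' 'A').insert 'C' 'G').insert 'G' 'C'

-- the `while` loop of B as recursion on a structural fuel counter: the guard `2*r ≤ 12` fails from
-- r = 7 on, so starting with fuel 7 at r = 1 the fuel is never exhausted and the port is exact.
-- seq[c-r] / seq[c-1+r] are read only under the guards r ≤ c, c-1+r < n, so pyGetD is exact there.
def pvExpand (l : List Char) (n c : Int) : Nat → Int → List (Int × Int) → List (Int × Int)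
  | 0, _, found => found
  | k + 1, r, found =>
    if r ≤ c ∧ c - 1 + r < n ∧ 2 * r ≤ 12 ∧
        pvComp.get? (PySem.List.pyGetD l (c - r) 'A') = some (PySem.List.pyGetD l (c - 1 + r) 'A') then
      pvExpand l n c k (r + 1) (if 4 ≤ 2 * r then found ++ [(c - r + 1, 2 * r)] else found)
    else found

def rest_site_alt (seq : String) : List (Int × Int) :=
  let l := seq.toList
  let n := PySem.List.len l
  let found := (PySem.List.pyRange 1 n 1).foldl (fun found c => pvExpand l n c 7 1 found) []
  PySem.List.sorted2 found (fun t => t.1) (fun t => t.2)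

-- ===== PRECONDITION & SPEC =====
-- Pre_ excludes exactly the inputs where A raises: a string of length ≥ 4 with a character other
-- than A, C, G, T makes reverse_pal hit a missing dict key (KeyError); shorter strings never call it.
def Pre_rest_site (seq : String) : Prop :=
  seq.toList.length < 4 ∨
    (seq.toList.all (fun c => c == 'A' || c == 'C' || c == 'G' || c == 'T')) = true
instance (seq : String) : Decidable (Pre_rest_site seq) := by unfold Pre_rest_site; infer_instance
def pvWitness_rest_site : String := "GCATGC"

def Spec_rest_site (seq : String) (out : List (Int × Int)) : Prop := out = rest_site_alt seq
instance (seq : String) (out : List (Int × Int)) : Decidable (Spec_rest_site seq out) := by unfold Spec_rest_site; infer_instance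

-- ===== CLAIM (what is proved, stated in full; the proofs are below) =====
def Claim_equal_rest_site : Prop := ∀ (seq : String), Dom_rest_site seq → Pre_rest_site seq → Spec_rest_site seq (rest_site seq)

-- ===== LEMMAS AND PROOFS =====

-- proof-side abbreviations
def pvKeys : List Char := ['A', 'T', 'C', 'G']

def pvF (x : Char) : Char := pvBases.getD x x

-- the pair (l[i+k], l[i+j-1-k]) is complementary for every k < j
def pvPairs (l : List Char) (i j : Int) : Prop :=
  ∀ k : Int, 0 ≤ k → k < j → pvComp.get? (PySem.List.pyGetD l (i + k) 'A')
      = some (PySem.List.pyGetD l (i + j - 1 - k) 'A')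

-- the common characterisation: x is a reverse-palindrome site of l
def pvP (l : List Char) (x : Int × Int) : Prop :=
  ∃ i j : Int, 0 ≤ i ∧ i + j ≤ (l.length : Int) ∧ 4 ≤ j ∧ j ≤ 12 ∧ pvPairs l i j ∧ x = (i + 1, j)

-- A's per-window test, as a Bool
def pvCondA (l : List Char) (i j : Int) : Bool :=
  let sub := PySem.List.slice l (some i) (some (i + j))
  decide (¬ PySem.List.len sub < j) && decide (sub = reverse_pal sub)

def pvAlist (l : List Char) : List (Int × Int) :=
  (PySem.List.pyRange 0 (l.length : Int) 1).flatMap (fun i =>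
    ((PySem.List.pyRange 4 13 1).filter (pvCondA l i)).map (fun j => (i + 1, j)))

-- B's while-guard at radius r
def pvCondB (l : List Char) (n c r : Int) : Prop :=
  r ≤ c ∧ c - 1 + r < n ∧ 2 * r ≤ 12 ∧
    pvComp.get? (PySem.List.pyGetD l (c - r) 'A') = some (PySem.List.pyGetD l (c - 1 + r) 'A')

def pvFound (l : List Char) : List (Int × Int) :=
  (PySem.List.pyRange 1 (l.length : Int) 1).flatMap
    (fun c => pvExpand l (l.length : Int) c 7 1 [])

-- an order-embedding for the pairs produced (their snd always lies in [4,12])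
def pvKey16 (t : Int × Int) : Int := t.1 * 16 + t.2

-- ---------- basic character facts ----------

lemma pvCm_eq_iff {x y : Char} (hx : x ∈ pvKeys) (hy : y ∈ pvKeys) :
    pvComp.get? x = some y ↔ x = pvF y := by
  simp only [pvKeys, List.mem_cons, List.not_mem_nil, or_false] at hx hy
  rcases hx with rfl | rfl | rfl | rfl <;> rcases hy with rfl | rfl | rfl | rfl <;> decide

lemma pvCm_flip {x y : Char} (hx : x ∈ pvKeys) (hy : y ∈ pvKeys) :
    pvComp.get? x = some y → pvComp.get? y = some x := by
  simp only [pvKeys, List.mem_cons, List.not_mem_nil, or_false] at hx hy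
  rcases hx with rfl | rfl | rfl | rfl <;> rcases hy with rfl | rfl | rfl | rfl <;> decide

lemma pvCm_ne_self {x : Char} (hx : x ∈ pvKeys) : pvComp.get? x ≠ some x := by
  simp only [pvKeys, List.mem_cons, List.not_mem_nil, or_false] at hx
  rcases hx with rfl | rfl | rfl | rfl <;> decide

lemma pvMem_keys' {l : List Char} (hl : ∀ c ∈ l, c ∈ pvKeys) {c : Char} (hc : c ∈ l) :
    c ∈ pvKeys := hl c hc

-- ---------- A-side ----------

lemma rest_site_eq_pvAlist (seq : String) : rest_site seq = pvAlist seq.toList := by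
  unfold rest_site pvAlist
  simp only [PySem.List.len_eq]
  rw [show (0 : Int) = ((0 : Nat) : Int) by norm_num] at *
  have hinner : ∀ (i : Int) (res : List (Int × Int)),
      (PySem.List.pyRange 4 13 1).foldl (fun res j =>
        let sub := PySem.List.slice seq.toList (some i) (some (i + j))
        if PySem.List.len sub < j then res
        else
          let rev_pal := reverse_pal sub
          if sub = rev_pal then res ++ [(i + 1, j)] else res) res
      = res ++ ((PySem.List.pyRange 4 13 1).filter (pvCondA seq.toList i)).map
          (fun j => (i + 1, j)) := by
    intro i res
    rw [PySem.List.foldl_congr_mem (g := fun res j =>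
      if pvCondA seq.toList i j then res ++ [(i + 1, j)] else res)]
    · exact PySem.List.foldl_append_if _ _ _ _
    · intro acc j hj
      simp only [pvCondA, PySem.List.len_eq, Bool.and_eq_true, decide_eq_true_eq]
      by_cases h1 : ((PySem.List.slice seq.toList (some i) (some (i + j))).length : Int) < j
      · rw [if_pos h1, if_neg (by tauto)]
      · rw [if_neg h1]
        by_cases h2 : PySem.List.slice seq.toList (some i) (some (i + j))
            = reverse_pal (PySem.List.slice seq.toList (some i) (some (i + j)))
        · rw [if_pos h2, if_pos ⟨h1, h2⟩]
        · rw [if_neg h2, if_neg (by tauto)]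
  rw [PySem.List.foldl_congr_mem (g := fun res i =>
    res ++ ((PySem.List.pyRange 4 13 1).filter (pvCondA seq.toList i)).map (fun j => (i + 1, j)))]
  · rw [PySem.List.foldl_append_eq_flatMap]; simp
  · intro acc i _; exact hinner i acc

lemma pvPal_iff (l : List Char) (hl : ∀ c ∈ l, c ∈ pvKeys) (a b : Nat)
    (h : a + b ≤ l.length) :
    ((l.drop a).take b = reverse_pal ((l.drop a).take b)) ↔
      pvPairs l (a : Int) (b : Int) := by
  have hlen : ((l.drop a).take b).length = b := by
    simp [List.length_take, List.length_drop]; omega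
  have hrev : reverse_pal ((l.drop a).take b) = ((l.drop a).take b).reverse.map pvF := rfl
  have hrevlen : (reverse_pal ((l.drop a).take b)).length = b := by
    rw [hrev]; simp only [List.length_map, List.length_reverse]; exact hlen
  have hget : ∀ (k : Nat) (hk : k < b), ((l.drop a).take b)[k]'(by omega) = l[a + k]'(by omega) := by
    intro k hk
    rw [List.getElem_take, List.getElem_drop]
  have hmem : ∀ (m : Nat) (hm : m < l.length), l[m] ∈ pvKeys :=
    fun m hm => hl _ (List.getElem_mem hm)
  have hrget : ∀ (k : Nat) (hk : k < b),
      (reverse_pal ((l.drop a).take b))[k]'(by omega) = pvF (l[a + b - 1 - k]'(by omega)) := by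
    intro k hk
    have h1 : (reverse_pal ((l.drop a).take b))[k]'(by omega)
        = (((l.drop a).take b).reverse.map pvF)[k]'(by simp; omega) := by
      exact List.getElem_of_eq hrev _
    rw [h1, List.getElem_map, List.getElem_reverse]
    simp only [hlen]
    have h2 : a + b - 1 - k = a + (b - 1 - k) := by omega
    simp only [h2]
    rw [hget (b - 1 - k) (by omega)]
  constructor
  · intro he k hk0 hkb
    lift k to Nat using hk0
    have hkb' : k < b := by exact_mod_cast hkb
    have e1 : l[a + k]'(by omega) = pvF (l[a + b - 1 - k]'(by omega)) := by
      rw [← hget k hkb', ← hrget k hkb']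
      exact List.getElem_of_eq he _
    have e2 := (pvCm_eq_iff (hmem (a + k) (by omega)) (hmem (a + b - 1 - k) (by omega))).mpr e1
    rw [PySem.List.pyGetD_eq_getElem l 'A' (by omega) (by omega),
        PySem.List.pyGetD_eq_getElem l 'A' (by omega) (by omega)]
    simp only [show ((a : Int) + (k : Int)).toNat = a + k from by omega,
      show ((a : Int) + (b : Int) - 1 - (k : Int)).toNat = a + b - 1 - k from by omega]
    exact e2
  · intro hp
    apply List.ext_getElem (by rw [hlen, hrevlen])
    intro k hk1 hk2
    have hkb' : k < b := by omega
    rw [hget k hkb', hrget k hkb']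
    apply (pvCm_eq_iff (hmem (a + k) (by omega)) (hmem (a + b - 1 - k) (by omega))).mp
    have := hp (k : Int) (by omega) (by exact_mod_cast hkb')
    rw [PySem.List.pyGetD_eq_getElem l 'A' (by omega) (by omega),
        PySem.List.pyGetD_eq_getElem l 'A' (by omega) (by omega)] at this
    simpa only [show ((a : Int) + (k : Int)).toNat = a + k from by omega,
      show ((a : Int) + (b : Int) - 1 - (k : Int)).toNat = a + b - 1 - k from by omega] using this

lemma pvCondA_iff (l : List Char) (hl : ∀ c ∈ l, c ∈ pvKeys) (i j : Int)
    (hi : 0 ≤ i) (hj : 4 ≤ j) :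
    pvCondA l i j = true ↔ (i + j ≤ (l.length : Int) ∧ pvPairs l i j) := by
  have h0j : 0 ≤ j := by omega
  lift i to Nat using hi
  lift j to Nat using h0j
  have hj4' : 4 ≤ j := by exact_mod_cast hj
  simp only [pvCondA, PySem.List.len_eq, Bool.and_eq_true, decide_eq_true_eq]
  rw [show ((i : Int) + (j : Int)) = ((i + j : Nat) : Int) from by push_cast; ring,
    PySem.List.slice_natCast]
  rw [show i + j - i = j from by omega]
  have hlen : ((l.drop i).take j).length = min j (l.length - i) := by
    simp [List.length_take, List.length_drop]
  constructor
  · rintro ⟨hA, hB⟩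
    have hle : i + j ≤ l.length := by rw [hlen] at hA; push_cast at hA; omega
    exact ⟨by exact_mod_cast hle, (pvPal_iff l hl i j hle).mp hB⟩
  · rintro ⟨hle, hp⟩
    have hle' : i + j ≤ l.length := by exact_mod_cast hle
    refine ⟨?_, (pvPal_iff l hl i j hle').mpr hp⟩
    rw [hlen]; push_cast; omega

lemma mem_pvAlist (l : List Char) (hl : ∀ c ∈ l, c ∈ pvKeys) (x : Int × Int) :
    x ∈ pvAlist l ↔ pvP l x := by
  unfold pvAlist pvP
  simp only [List.mem_flatMap, List.mem_map, List.mem_filter, PySem.List.mem_pyRange_one]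
  constructor
  · rintro ⟨i, ⟨hi0, hin⟩, j, ⟨⟨hj4, hj13⟩, hcond⟩, rfl⟩
    obtain ⟨hle, hp⟩ := (pvCondA_iff l hl i j hi0 hj4).mp hcond
    exact ⟨i, j, hi0, hle, hj4, by omega, hp, rfl⟩
  · rintro ⟨i, j, hi0, hle, hj4, hj12, hp, rfl⟩
    exact ⟨i, ⟨hi0, by omega⟩, j, ⟨⟨hj4, by omega⟩,
      (pvCondA_iff l hl i j hi0 hj4).mpr ⟨hle, hp⟩⟩, rfl⟩

lemma pvAlist_pairwise (l : List Char) :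
    (pvAlist l).Pairwise (fun a b => pvKey16 a < pvKey16 b) := by
  unfold pvAlist
  rw [List.pairwise_flatMap]
  constructor
  · intro i _
    rw [List.pairwise_map]
    refine List.Pairwise.filter _ ?_
    refine (PySem.List.pairwise_lt_pyRange_one 4 13).imp_of_mem ?_
    intro j j' _ _ hlt
    simp only [pvKey16]; omega
  · refine (PySem.List.pairwise_lt_pyRange_one 0 (l.length : Int)).imp_of_mem ?_
    intro iA iB _ _ hlt x hx y hy
    simp only [List.mem_map, List.mem_filter, PySem.List.mem_pyRange_one] at hx hy
    obtain ⟨j, ⟨⟨hj4, hj13⟩, -⟩, rfl⟩ := hx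
    obtain ⟨j', ⟨⟨hj4', hj13'⟩, -⟩, rfl⟩ := hy
    simp only [pvKey16]; omega

lemma pvAlist_nodup (l : List Char) : (pvAlist l).Nodup := by
  refine ((pvAlist_pairwise l).imp ?_)
  intro a b hab
  intro hEq; rw [hEq] at hab; exact lt_irrefl _ hab

-- ---------- B-side ----------

lemma pvExpand_append (l : List Char) (n c : Int) :
    ∀ (k : Nat) (r : Int) (fnd : List (Int × Int)),
      pvExpand l n c k r fnd = fnd ++ pvExpand l n c k r [] := by
  intro k
  induction k with
  | zero => intro r fnd; simp [pvExpand]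
  | succ k ih =>
    intro r fnd
    simp only [pvExpand]
    split
    · rw [ih (r + 1) (if 4 ≤ 2 * r then fnd ++ [(c - r + 1, 2 * r)] else fnd),
        ih (r + 1) (if 4 ≤ 2 * r then ([] : List (Int × Int)) ++ [(c - r + 1, 2 * r)] else [])]
      split <;> simp
    · simp

-- every emitted pair has the shape (c - s + 1, 2s) with r ≤ s and 4 ≤ 2s ≤ 12
lemma pvExpand_shape (l : List Char) (n c : Int) :
    ∀ (k : Nat) (r : Int) (x : Int × Int), x ∈ pvExpand l n c k r [] →
      ∃ s : Int, r ≤ s ∧ 4 ≤ 2 * s ∧ 2 * s ≤ 12 ∧ x = (c - s + 1, 2 * s) := by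
  intro k
  induction k with
  | zero => intro r x hx; simp [pvExpand] at hx
  | succ k ih =>
    intro r x hx
    simp only [pvExpand] at hx
    split at hx
    · rename_i hcond
      rw [pvExpand_append] at hx
      rcases List.mem_append.mp hx with hx | hx
      · split at hx
        · simp at hx
          exact ⟨r, le_refl r, by omega, hcond.2.2.1, by simp [hx]⟩
        · simp at hx
      · obtain ⟨s, hs1, hs2, hs3, hs4⟩ := ih (r + 1) x hx
        exact ⟨s, by omega, hs2, hs3, hs4⟩
    · simp at hx

lemma mem_pvExpand (l : List Char) (n c : Int) :
    ∀ (k : Nat) (r : Int), (7 : Int) ≤ (k : Int) + r → ∀ x : Int × Int,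
      (x ∈ pvExpand l n c k r [] ↔
        ∃ s : Int, r ≤ s ∧ (∀ r', r ≤ r' → r' ≤ s → pvCondB l n c r') ∧
          4 ≤ 2 * s ∧ x = (c - s + 1, 2 * s)) := by
  intro K
  induction K with
  | zero =>
    intro r h7 x
    simp only [pvExpand, List.not_mem_nil, false_iff]
    push_cast at h7
    rintro ⟨s, hs1, hall, hs4, rfl⟩
    have := (hall r le_rfl hs1).2.2.1
    omega
  | succ k ih =>
    intro r h7 x
    have h7' : (7 : Int) ≤ (k : Int) + (r + 1) := by push_cast at h7 ⊢; omega
    simp only [pvExpand]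
    split
    · rename_i hcond
      have hcondB : pvCondB l n c r := hcond
      rw [pvExpand_append, List.mem_append, ih (r + 1) h7' x]
      constructor
      · rintro (hx | ⟨s, hs1, hall, hs4, rfl⟩)
        · have hx' : 4 ≤ 2 * r ∧ x = (c - r + 1, 2 * r) := by
            split at hx <;> simp at hx
            · rename_i h4; exact ⟨h4, hx⟩
          refine ⟨r, le_rfl, ?_, hx'.1, hx'.2⟩
          intro r' h1 h2
          have : r' = r := le_antisymm h2 h1
          rw [this]; exact hcondB
        · refine ⟨s, by omega, ?_, hs4, rfl⟩
          intro r' h1 h2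
          by_cases hr : r' = r
          · rw [hr]; exact hcondB
          · exact hall r' (by omega) h2
      · rintro ⟨s, hs1, hall, hs4, rfl⟩
        by_cases hsr : s = r
        · subst hsr
          left
          rw [if_pos (by omega)]
          simp
        · right
          exact ⟨s, by omega, fun r' h1 h2 => hall r' (by omega) h2, hs4, rfl⟩
    · rename_i hcond
      simp only [List.not_mem_nil, false_iff]
      rintro ⟨s, hs1, hall, hs4, rfl⟩
      exact hcond (hall r le_rfl hs1)

lemma pvExpand_nodup (l : List Char) (n c : Int) :
    ∀ (k : Nat) (r : Int), (pvExpand l n c k r []).Nodup := by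
  intro k
  induction k with
  | zero => intro r; simp [pvExpand]
  | succ k ih =>
    intro r
    simp only [pvExpand]
    split
    · rw [pvExpand_append]
      refine List.Nodup.append ?_ (ih (r + 1)) ?_
      · split <;> simp
      · intro x hx1 hx2
        obtain ⟨s, hs1, _, _, hs4⟩ := pvExpand_shape l n c k (r + 1) x hx2
        split at hx1 <;> simp at hx1
        subst hx1
        simp at hs4
        omega
    · simp

lemma pvFound_eq (l : List Char) :
    (PySem.List.pyRange 1 (l.length : Int) 1).foldl
        (fun found c => pvExpand l (l.length : Int) c 7 1 found) [] = pvFound l := by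
  unfold pvFound
  rw [PySem.List.foldl_congr_mem (g := fun found c =>
    found ++ pvExpand l (l.length : Int) c 7 1 [])]
  · rw [PySem.List.foldl_append_eq_flatMap]; simp
  · intro acc x _; exact pvExpand_append l (l.length : Int) x 7 1 acc

lemma mem_pvFound (l : List Char) (x : Int × Int) :
    x ∈ pvFound l ↔
      ∃ c : Int, 1 ≤ c ∧ c < (l.length : Int) ∧
        ∃ s : Int, 1 ≤ s ∧ (∀ r', 1 ≤ r' → r' ≤ s → pvCondB l (l.length : Int) c r') ∧
          4 ≤ 2 * s ∧ x = (c - s + 1, 2 * s) := by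
  unfold pvFound
  simp only [List.mem_flatMap, PySem.List.mem_pyRange_one]
  constructor
  · rintro ⟨c, ⟨hc1, hc2⟩, hx⟩
    exact ⟨c, hc1, hc2, (mem_pvExpand l _ c 7 1 (by norm_num) x).mp hx⟩
  · rintro ⟨c, hc1, hc2, hs⟩
    exact ⟨c, ⟨hc1, hc2⟩, (mem_pvExpand l _ c 7 1 (by norm_num) x).mpr hs⟩

lemma pvFound_nodup (l : List Char) : (pvFound l).Nodup := by
  unfold pvFound
  rw [List.nodup_flatMap]
  constructor
  · intro c _; exact pvExpand_nodup l _ c 7 1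
  · refine (PySem.List.pairwise_lt_pyRange_one 1 (l.length : Int)).imp_of_mem ?_
    intro c c' _ _ hlt
    intro x hx hx'
    obtain ⟨s, _, _, _, hs⟩ := pvExpand_shape l _ c 7 1 x hx
    obtain ⟨s', _, _, _, hs'⟩ := pvExpand_shape l _ c' 7 1 x hx'
    rw [hs] at hs'
    simp at hs'
    omega

-- evenness: an odd window is never a reverse palindrome
lemma pvPairs_even (l : List Char) (hl : ∀ c ∈ l, c ∈ pvKeys) (i j : Int)
    (hi : 0 ≤ i) (hn : i + j ≤ (l.length : Int)) (hj : 1 ≤ j) (hp : pvPairs l i j) :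
    2 ∣ j := by
  rcases Int.even_or_odd j with he | ho
  · exact he.two_dvd
  · obtain ⟨m, hm⟩ := ho
    exfalso
    have hk := hp m (by omega) (by omega)
    rw [show i + j - 1 - m = i + m from by omega] at hk
    have hmem : PySem.List.pyGetD l (i + m) 'A' ∈ pvKeys :=
      pvMem_keys' hl (PySem.List.pyGetD_mem l 'A' ⟨by omega, by omega⟩)
    exact pvCm_ne_self hmem hk

lemma mem_pvFound_iff_pvP (l : List Char) (hl : ∀ c ∈ l, c ∈ pvKeys) (x : Int × Int) :
    x ∈ pvFound l ↔ pvP l x := by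
  rw [mem_pvFound]
  unfold pvP
  constructor
  · rintro ⟨c, hc1, hc2, s, hs1, hall, hs4, rfl⟩
    obtain ⟨hsc, hsn, hs12, -⟩ := hall s hs1 le_rfl
    refine ⟨c - s, 2 * s, by omega, by omega, by omega, by omega, ?_, ?_⟩
    · intro k hk0 hk2s
      by_cases hks : k < s
      · have hcb := (hall (s - k) (by omega) (by omega)).2.2.2
        rw [show c - (s - k) = c - s + k from by omega] at hcb
        rw [show c - 1 + (s - k) = c - s + 2 * s - 1 - k from by omega] at hcb
        exact hcb
      · obtain ⟨hrc, hrn, -, hcm⟩ := hall (k - s + 1) (by omega) (by omega)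
        rw [show c - (k - s + 1) = c - s + 2 * s - 1 - k from by omega] at hcm
        rw [show c - 1 + (k - s + 1) = c - s + k from by omega] at hcm
        have hx : PySem.List.pyGetD l (c - s + 2 * s - 1 - k) 'A' ∈ pvKeys :=
          pvMem_keys' hl (PySem.List.pyGetD_mem l 'A' ⟨by omega, by omega⟩)
        have hy : PySem.List.pyGetD l (c - s + k) 'A' ∈ pvKeys :=
          pvMem_keys' hl (PySem.List.pyGetD_mem l 'A' ⟨by omega, by omega⟩)
        exact pvCm_flip hx hy hcm
    · have : c - s + 1 = (c - s) + 1 := by ring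
      rw [this]
  · rintro ⟨i, j, hi0, hn, hj4, hj12, hp, rfl⟩
    have he : 2 ∣ j := pvPairs_even l hl i j hi0 hn (by omega) hp
    obtain ⟨s, rfl⟩ := he
    refine ⟨i + s, by omega, by omega, s, by omega, ?_, by omega, ?_⟩
    · intro r' h1 h2
      refine ⟨by omega, by omega, by omega, ?_⟩
      have hk := hp (s - r') (by omega) (by omega)
      rw [show i + (s - r') = i + s - r' from by omega] at hk
      rw [show i + 2 * s - 1 - (s - r') = i + s - 1 + r' from by omega] at hk
      exact hk
    · have : (i + 1, 2 * s) = (i + s - s + 1, 2 * s) := by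
        rw [show i + s - s = i from by ring]
      exact this

lemma pvFound_perm (l : List Char) (hl : ∀ c ∈ l, c ∈ pvKeys) :
    (pvAlist l).Perm (pvFound l) := by
  rw [List.perm_ext_iff_of_nodup (pvAlist_nodup l) (pvFound_nodup l)]
  intro x
  rw [mem_pvAlist l hl x, mem_pvFound_iff_pvP l hl x]

-- ---------- sorting ----------

lemma pvInsertBy_congr {α : Type} (b1 b2 : α → α → Bool) (x : α) (ys : List α)
    (h : ∀ y ∈ ys, b1 x y = b2 x y) :
    PySem.List.insertBy b1 x ys = PySem.List.insertBy b2 x ys := by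
  induction ys with
  | nil => rfl
  | cons y ys ih =>
    simp only [PySem.List.insertBy]
    rw [h y (by simp)]
    split
    · rfl
    · rw [ih (fun z hz => h z (by simp [hz]))]

lemma pvFoldl_insertBy_congr {α : Type} (S : List α) (b1 b2 : α → α → Bool)
    (h : ∀ x ∈ S, ∀ y ∈ S, b1 x y = b2 x y) :
    ∀ (xs acc : List α), (∀ x ∈ xs, x ∈ S) → (∀ y ∈ acc, y ∈ S) →
      xs.foldl (fun a x => PySem.List.insertBy b1 x a) acc
        = xs.foldl (fun a x => PySem.List.insertBy b2 x a) acc := by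
  intro xs
  induction xs with
  | nil => intro acc _ _; rfl
  | cons x xs ih =>
    intro acc hxs hacc
    simp only [List.foldl_cons]
    rw [pvInsertBy_congr b1 b2 x acc (fun y hy => h x (hxs x (by simp)) y (hacc y hy))]
    exact ih _ (fun z hz => hxs z (by simp [hz]))
      (fun y hy => by
        rcases (PySem.List.mem_insertBy b2 x y acc).mp hy with rfl | hy
        · exact hxs y (by simp)
        · exact hacc y hy)

-- found's snds lie in [4,12], where the lexicographic tuple order is the pvKey16 order
lemma pvSorted2_eq_sorted_key16 (l : List Char) :
    PySem.List.sorted2 (pvFound l) (fun t => t.1) (fun t => t.2)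
      = PySem.List.sorted (pvFound l) pvKey16 := by
  have hmem : ∀ x ∈ pvFound l, 4 ≤ x.2 ∧ x.2 ≤ 12 := by
    intro x hx
    unfold pvFound at hx
    rcases List.mem_flatMap.mp hx with ⟨c, -, hx⟩
    obtain ⟨s, -, h4, h12, rfl⟩ := pvExpand_shape l (l.length : Int) c 7 1 x hx
    exact ⟨by omega, by omega⟩
  show (pvFound l).foldl (fun a x => PySem.List.insertBy
      (fun a b => decide (a.1 < b.1) || (!decide (b.1 < a.1) && decide (a.2 < b.2))) x a) []
    = (pvFound l).foldl (fun a x => PySem.List.insertBy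
      (fun a b => decide (pvKey16 a < pvKey16 b)) x a) []
  refine pvFoldl_insertBy_congr (pvFound l) _ _ ?_ (pvFound l) [] (fun _ h => h) (by simp)
  intro x hx y hy
  obtain ⟨hx1, hx2⟩ := hmem x hx
  obtain ⟨hy1, hy2⟩ := hmem y hy
  simp only [pvKey16]
  by_cases h1 : x.1 < y.1 <;> by_cases h2 : y.1 < x.1 <;> by_cases h3 : x.2 < y.2 <;>
    simp [h1, h2, h3] <;> omega

-- ---------- degenerate case: length < 4 ----------

lemma pvAlist_nil_of_short (l : List Char) (h : l.length < 4) : pvAlist l = [] := by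
  unfold pvAlist
  rw [List.flatMap_eq_nil_iff.mpr]
  intro i _
  rw [List.map_eq_nil_iff, List.filter_eq_nil_iff]
  intro j hj
  rw [PySem.List.mem_pyRange_one] at hj
  simp only [pvCondA, Bool.and_eq_true, decide_eq_true_eq]
  rintro ⟨h1, -⟩
  apply h1
  rw [PySem.List.len_eq, PySem.List.length_slice]
  have h1 := PySem.List.clampIdx_le l.length (i + j)
  have h2 := PySem.List.clampIdx_le l.length i
  omega

lemma pvFound_nil_of_short (l : List Char) (h : l.length < 4) : pvFound l = [] := by
  rw [List.eq_nil_iff_forall_not_mem]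
  intro x hx
  obtain ⟨c, hc1, hc2, s, hs1, hall, hs4, -⟩ := (mem_pvFound l x).mp hx
  have h2 : pvCondB l (l.length : Int) c 2 := hall 2 (by omega) (by omega)
  obtain ⟨hrc, hrn, -, -⟩ := h2
  omega

-- ---------- assembly ----------

lemma rest_site_alt_eq (seq : String) :
    rest_site_alt seq
      = PySem.List.sorted2 (pvFound seq.toList) (fun t => t.1) (fun t => t.2) := by
  unfold rest_site_alt
  simp only [PySem.List.len_eq]
  rw [pvFound_eq seq.toList]

-- ===== VERDICT (by name: the statement is the Claim_ definition above) =====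
theorem rest_site_spec : Claim_equal_rest_site := by
  intro seq _ hpre
  unfold Spec_rest_site
  rw [rest_site_eq_pvAlist, rest_site_alt_eq]
  rcases hpre with hshort | hacgt
  · rw [pvAlist_nil_of_short _ hshort, pvFound_nil_of_short _ hshort]; rfl
  · have hl : ∀ c ∈ seq.toList, c ∈ pvKeys := by
      intro c hc
      have hcc := List.all_eq_true.mp hacgt c hc
      simp only [Bool.or_eq_true, beq_iff_eq] at hcc
      simp only [pvKeys, List.mem_cons, List.not_mem_nil, or_false]
      tauto
    rw [pvSorted2_eq_sorted_key16]
    exact (PySem.List.sorted_eq_of_perm_of_pairwise_lt _ _ pvKey16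
      (pvFound_perm seq.toList hl) ((pvAlist_pairwise seq.toList))).symm
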